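-- pv_equiv track=rewrite | github.com/Brychlikov/matura_solutions | 2020/zad4.py | zad42
-- ===== SOURCE A (Python) =====
-- def zad42(l):
--     luki = [abs(x - y) for x, y in zip(l[:-1], l[1:])]
--     current_luka = -1
--     start_index = None
--
--     best_count = 0
--     best_start = None
--
--     for i, el in enumerate(luki):
--         if el != current_luka:
--             if start_index != None:
--                 count = i - start_index
--                 if count > best_count:
--                     best_count = count
--                     best_start = start_index
--                     best_end = i
--             start_index = i
--             current_luka = el
--
--     # dodajemy 1 ponieważ 3 luki odpowiadają 4 elementom
--     return best_count + 1, l[best_start], l[best_end]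
-- ===== SOURCE B (Python) =====
-- def zad42(l):
--     luki = [abs(x - y) for x, y in zip(l, l[1:])]
--     runs = []  # (length, start) of each maximal run of equal gaps
--     i = 0
--     while i < len(luki):
--         j = i
--         while j < len(luki) and luki[j] == luki[i]:
--             j += 1
--         runs.append((j - i, i))
--         i = j
--     n, s = max(runs, key=lambda r: r[0])
--     return n + 1, l[s], l[s + n]
-- ===== Notes on version B (the rewrite author's own statement) =====
-- stated objective: alternative
-- what changed: B replaces A's single stateful change-detection loop (current value, open-run start, best-so-far) by a two-pointer run-length decomposition: scan each maximal run of equal gaps with an inner pointer, collect (length, start) pairs, then take the first longest run with max(key=length); Pre_ excludes the inputs on which A raises TypeError via l[None] (fewer than 3 elements or all consecutive gaps equal, so no run is ever closed).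
-- intended difference: On lists whose final maximal run of equal gaps is strictly longer than every earlier run, A returns the longest run among the earlier runs only (its loop never closes the last run), while B returns the final, genuinely longest run, which is the intended answer to 'longest run of equal gaps'. — e.g. on zad42([0, 1, 3, 5]): A returns (2, 0, 1), B returns (3, 1, 5)
import Mathlib
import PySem

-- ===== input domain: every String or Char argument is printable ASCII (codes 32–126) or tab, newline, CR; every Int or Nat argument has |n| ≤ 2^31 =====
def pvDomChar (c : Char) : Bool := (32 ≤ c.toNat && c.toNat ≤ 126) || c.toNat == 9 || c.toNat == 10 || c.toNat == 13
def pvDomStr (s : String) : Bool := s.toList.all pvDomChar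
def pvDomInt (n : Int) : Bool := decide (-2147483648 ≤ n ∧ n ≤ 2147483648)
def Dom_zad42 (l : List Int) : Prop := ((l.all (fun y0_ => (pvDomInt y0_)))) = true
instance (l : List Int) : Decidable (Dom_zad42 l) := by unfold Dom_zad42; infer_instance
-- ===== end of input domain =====

-- B replaces A's single stateful change-detection loop by a two-pointer run-length
-- decomposition (collect (length, start) of each maximal run of equal gaps, then take the
-- first longest run with max); objective: alternative decomposition, same cost. A never
-- closes the final run: where that run is the strict longest, B's answer differs and is
-- the intended one (stated in D_ below); inputs on which A raises are excluded by Pre_.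

-- ===== PORT A =====
-- the for-loop of A over enumerate(luki): state (current_luka, start_index, best_count, best_start, best_end)
def zad42Loop : List Int → Nat → Int → Option Nat → Int → Option Nat → Nat → Int × Option Nat × Nat
  | [], _, _, _, bc, bs, be => (bc, bs, be)
  | el :: rest, i, cur, si, bc, bs, be =>
    if el ≠ cur then
      match si with
      | some st =>
        let count : Int := (i : Int) - (st : Int)
        if count > bc then zad42Loop rest (i+1) el (some i) count (some st) i
        else zad42Loop rest (i+1) el (some i) bc bs be
      | none => zad42Loop rest (i+1) el (some i) bc bs be
    else zad42Loop rest (i+1) cur si bc bs be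

def zad42 (l : List Int) : Int × Int × Int :=
  -- luki = [abs(x - y) for x, y in zip(l[:-1], l[1:])]
  let luki := List.zipWith (fun x y => |x - y|)
      (PySem.List.slice l none (some (-1))) (PySem.List.slice l (some 1) none)
  let r := zad42Loop luki 0 (-1) none 0 none 0
  match r.2.1 with
  | none => (r.1 + 1, 0, 0)  -- Python raises TypeError (l[None]) here; excluded by Pre_zad42
  | some s => (r.1 + 1, (PySem.List.pyGet? l (s : Int)).getD 0,
               (PySem.List.pyGet? l ((r.2.2 : Nat) : Int)).getD 0)

-- ===== PORT B =====
-- inner while loop: j advances while luki[j] == luki[i] (v = luki[i]); indexing is in range,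
-- getD is exact; fuel (enough steps) only makes the recursion structural
def zad42AltInner (luki : List Int) (fuel : Nat) (v : Int) (j : Nat) : Nat :=
  match fuel with
  | 0 => j
  | fuel+1 => if j < luki.length ∧ luki.getD j 0 = v then zad42AltInner luki fuel v (j+1) else j

-- outer while loop: collect (length, start) of each maximal run of equal gaps
def zad42AltOuter (luki : List Int) (fuel : Nat) (i : Nat) (runs : List (Nat × Nat)) : List (Nat × Nat) :=
  match fuel with
  | 0 => runs
  | fuel+1 =>
    if i < luki.length then
      zad42AltOuter luki fuel (zad42AltInner luki luki.length (luki.getD i 0) i)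
        (runs ++ [(zad42AltInner luki luki.length (luki.getD i 0) i - i, i)])
    else runs

def zad42_alt (l : List Int) : Int × Int × Int :=
  -- luki = [abs(x - y) for x, y in zip(l, l[1:])]
  let luki := List.zipWith (fun x y => |x - y|) l (PySem.List.slice l (some 1) none)
  let runs := zad42AltOuter luki luki.length 0 []
  -- n, s = max(runs, key=lambda r: r[0])
  match PySem.List.max? runs (fun r => r.1) with
  | none => (0, 0, 0)  -- Python raises ValueError (max of empty sequence) here; excluded by Pre_zad42
  | some (n, s) => ((n : Int) + 1, (PySem.List.pyGet? l ((s : Nat) : Int)).getD 0,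
                    (PySem.List.pyGet? l (((s + n : Nat)) : Int)).getD 0)

-- ===== PRECONDITION & SPEC =====
-- Pre_ excludes exactly the inputs on which the Python A raises TypeError (l[None]): lists
-- whose consecutive gaps are all equal (in particular any list of length ≤ 2) — no run is
-- ever closed, so best_start stays None.
def Pre_zad42 (l : List Int) : Prop :=
  ∃ p ∈ (List.zipWith (fun x y => |x - y|) l l.tail).zip
        (List.zipWith (fun x y => |x - y|) l l.tail).tail, p.1 ≠ p.2
instance (l : List Int) : Decidable (Pre_zad42 l) := by unfold Pre_zad42; infer_instance

def pvWitness_zad42 : List Int := [0, 0, 1]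

-- run lengths of the maximal runs of equal values (used only to state D_)
def runLensAux (v : Int) (n : Nat) : List Int → List Nat
  | [] => [n]
  | x :: xs => if x = v then runLensAux v (n+1) xs else n :: runLensAux x 1 xs

-- On lists whose final maximal run of equal gaps is strictly longer than every earlier run,
-- A returns the longest among the earlier runs only (its loop never closes the last run),
-- while B returns that final, genuinely longest run — the intended answer.
def D_zad42 (l : List Int) : Prop :=
  match List.zipWith (fun x y => |x - y|) l l.tail with
  | [] => False
  | g :: gs =>
    2 ≤ (runLensAux g 1 gs).length ∧
      (runLensAux g 1 gs).dropLast.foldl max 0 < ((runLensAux g 1 gs).getLast?).getD 0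
instance (l : List Int) : Decidable (D_zad42 l) := by
  unfold D_zad42
  rcases List.zipWith (fun x y => |x - y|) l l.tail with _ | ⟨g, gs⟩ <;> simp <;> infer_instance

def Spec_zad42 (l : List Int) (out : Int × Int × Int) : Prop := ¬ D_zad42 l → out = zad42_alt l
instance (l : List Int) (out : Int × Int × Int) : Decidable (Spec_zad42 l out) := by unfold Spec_zad42; infer_instance

def pvDiffWitness_zad42 : List Int := [0, 1, 3, 5]
def pvDiffWitnessOut_zad42 : (Int × Int × Int) × (Int × Int × Int) := ((2, 0, 1), (3, 1, 5))

-- ===== CLAIM =====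
def Claim_unchanged_zad42 : Prop := ∀ (l : List Int), Dom_zad42 l → Pre_zad42 l → Spec_zad42 l (zad42 l)
def Claim_changed_zad42 : Prop := Dom_zad42 (pvDiffWitness_zad42) ∧ Pre_zad42 (pvDiffWitness_zad42) ∧ D_zad42 (pvDiffWitness_zad42) ∧ zad42 (pvDiffWitness_zad42) = pvDiffWitnessOut_zad42.1 ∧ zad42_alt (pvDiffWitness_zad42) = pvDiffWitnessOut_zad42.2 ∧ pvDiffWitnessOut_zad42.1 ≠ pvDiffWitnessOut_zad42.2
def Claim_exact_zad42 : Prop := ∀ (l : List Int), Dom_zad42 l → Pre_zad42 l → D_zad42 l → zad42 l ≠ zad42_alt l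

-- ===== LEMMAS AND PROOFS =====

-- proof-side canonical run decomposition of the gap list: (start, length) of each maximal run
def runsAux (v : Int) (s len : Nat) : List Int → List (Nat × Nat)
  | [] => [(s, len)]
  | x :: xs => if x = v then runsAux v s (len+1) xs else (s, len) :: runsAux x (s+len) 1 xs

lemma runsAux_cons_self (v : Int) (s len : Nat) (xs : List Int) :
    runsAux v s len (v :: xs) = runsAux v s (len+1) xs := by
  simp [runsAux]

lemma runsAux_cons_ne {x v : Int} (h : x ≠ v) (s len : Nat) (xs : List Int) :
    runsAux v s len (x :: xs) = (s, len) :: runsAux x (s+len) 1 xs := by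
  simp [runsAux, h]

lemma runsAux_ne_nil (xs : List Int) : ∀ v s len, runsAux v s len xs ≠ [] := by
  induction xs with
  | nil => intro v s len; simp [runsAux]
  | cons x xs ih =>
    intro v s len
    by_cases hx : x = v
    · subst hx; rw [runsAux_cons_self]; exact ih x s (len+1)
    · rw [runsAux_cons_ne hx]; simp

lemma runsAux_pos (xs : List Int) : ∀ v s len, 1 ≤ len → ∀ r ∈ runsAux v s len xs, 1 ≤ r.2 := by
  induction xs with
  | nil => intro v s len hlen r hr; simp [runsAux] at hr; simp [hr, hlen]
  | cons x xs ih =>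
    intro v s len hlen r hr
    by_cases hx : x = v
    · subst hx; rw [runsAux_cons_self] at hr; exact ih x s (len+1) (by omega) r hr
    · rw [runsAux_cons_ne hx] at hr
      rcases List.mem_cons.mp hr with h | h
      · simp [h, hlen]
      · exact ih x (s+len) 1 le_rfl r h

lemma runsAux_snd (xs : List Int) : ∀ v s len,
    (runsAux v s len xs).map (·.2) = runLensAux v len xs := by
  induction xs with
  | nil => intro v s len; simp [runsAux, runLensAux]
  | cons x xs ih =>
    intro v s len
    by_cases hx : x = v
    · subst hx; rw [runsAux_cons_self]; simp [runLensAux, ih]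
    · rw [runsAux_cons_ne hx]; simp [runLensAux, hx, ih]

lemma runLensAux_ne_nil (xs : List Int) (v : Int) (n : Nat) : runLensAux v n xs ≠ [] := by
  rw [← runsAux_snd xs v 0 n]
  simp [runsAux_ne_nil]

-- Pre_ bridge: a single run ⟺ all adjacent gaps equal
lemma runLensAux_len_one_iff (xs : List Int) : ∀ (v : Int) (n : Nat),
    (runLensAux v n xs).length = 1 ↔ ∀ p ∈ (v :: xs).zip xs, p.1 = p.2 := by
  induction xs with
  | nil => intro v n; simp [runLensAux]
  | cons y ys ih =>
    intro v n
    by_cases hy : y = v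
    · subst hy
      rw [runLensAux, if_pos rfl]
      simp only [List.zip_cons_cons, List.mem_cons]
      constructor
      · intro h p hp
        rcases hp with hp | hp
        · simp [hp]
        · exact (ih y (n+1)).mp h p hp
      · intro h
        exact (ih y (n+1)).mpr (fun p hp => h p (Or.inr hp))
    · rw [runLensAux, if_neg hy]
      constructor
      · intro h
        exfalso
        have h2 : runLensAux y 1 ys ≠ [] := runLensAux_ne_nil ys y 1
        simp only [List.length_cons] at h
        have := List.length_pos_of_ne_nil h2
        omega
      · intro h
        exact absurd ((h (v, y) (by simp)).symm) hy

-- A's abstract best state, the best-state transition, max's folding function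
def bestStep (st : Int × Option Nat × Option Nat) (r : Nat × Nat) : Int × Option Nat × Option Nat :=
  if (r.2 : Int) > st.1 then ((r.2 : Int), some r.1, some (r.1 + r.2)) else st

def abstrState (t : Int × Option Nat × Nat) : Int × Option Nat × Option Nat :=
  (t.1, t.2.1, t.2.1.map (fun _ => t.2.2))

def maxStep (acc : Option (Nat × Nat)) (x : Nat × Nat) : Option (Nat × Nat) :=
  match acc with
  | none => some x
  | some m => if m.1 < x.1 then some x else some m

def conv : Option (Nat × Nat) → Int × Option Nat × Option Nat
  | none => (0, none, none)
  | some (n, s) => ((n : Int), some s, some (s + n))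

-- A's loop, started inside a run beginning at s with len gaps seen, folds bestStep over
-- the canonical runs with the final (open) run dropped
lemma loopA_eq (xs : List Int) : ∀ (v : Int) (s len : Nat) (bc : Int) (bs : Option Nat) (be : Nat),
    abstrState (zad42Loop xs (s+len) v (some s) bc bs be)
      = ((runsAux v s len xs).dropLast).foldl bestStep (abstrState (bc, bs, be)) := by
  induction xs with
  | nil => intro v s len bc bs be; simp [zad42Loop, runsAux]
  | cons x xs ih =>
    intro v s len bc bs be
    by_cases hx : x = v
    · subst hx
      simp only [zad42Loop]
      rw [if_neg (by simp), runsAux_cons_self,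
        show s + len + 1 = s + (len + 1) from by omega]
      exact ih x s (len+1) bc bs be
    · have hcount : ((s + len : Nat) : Int) - (s : Nat) = (len : Int) := by push_cast; ring
      have hne : (runsAux x (s+len) 1 xs) ≠ [] := runsAux_ne_nil xs x (s+len) 1
      simp only [zad42Loop]
      rw [if_pos hx, runsAux_cons_ne hx, List.dropLast_cons_of_ne_nil hne,
        List.foldl_cons, hcount]
      by_cases hgt : (len : Int) > bc
      · rw [if_pos hgt]
        have hstep : bestStep (abstrState (bc, bs, be)) (s, len)
            = abstrState ((len : Int), some s, s + len) := by
          simp [bestStep, abstrState, hgt]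
        rw [hstep]
        exact ih x (s+len) 1 (len : Int) (some s) (s+len)
      · rw [if_neg hgt]
        have hstep : bestStep (abstrState (bc, bs, be)) (s, len)
            = abstrState (bc, bs, be) := by
          simp [bestStep, abstrState, hgt]
        rw [hstep]
        exact ih x (s+len) 1 bc bs be

lemma gaps_nonneg : ∀ (as bs : List Int) (z : Int),
    z ∈ List.zipWith (fun x y => |x - y|) as bs → 0 ≤ z := by
  intro as
  induction as with
  | nil => intro bs z h; simp at h
  | cons a as ih =>
    intro bs z h
    cases bs with
    | nil => simp at h
    | cons b bs =>
      simp only [List.zipWith_cons_cons, List.mem_cons] at h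
      rcases h with h | h
      · rw [h]; exact abs_nonneg (a - b)
      · exact ih bs z h

lemma zipWith_dropLast_tail (f : Int → Int → Int) (l : List Int) :
    List.zipWith f l.dropLast l.tail = List.zipWith f l l.tail := by
  cases l with
  | nil => rfl
  | cons a rest =>
    induction rest generalizing a with
    | nil => rfl
    | cons b rs ih => simpa [List.dropLast] using ih b

-- the fold of bestStep through conv is the fold of maxStep on the swapped pairs
lemma conv_fold (rs : List (Nat × Nat)) : ∀ acc, (∀ r ∈ rs, 1 ≤ r.2) →
    rs.foldl bestStep (conv acc) = conv (List.foldl maxStep acc (rs.map (fun r => (r.2, r.1)))) := by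
  induction rs with
  | nil => intro acc _; rfl
  | cons r rs ih =>
    intro acc hpos
    have hr : 1 ≤ r.2 := hpos r List.mem_cons_self
    have htail : ∀ q ∈ rs, 1 ≤ q.2 := fun q hq => hpos q (List.mem_cons_of_mem _ hq)
    rw [List.foldl_cons, List.map_cons, List.foldl_cons]
    cases acc with
    | none =>
      have h1 : bestStep (conv none) r = conv (maxStep none (r.2, r.1)) := by
        simp only [conv, bestStep, maxStep]
        rw [if_pos (by exact_mod_cast hr)]
      rw [h1]
      exact ih _ htail
    | some m =>
      rcases m with ⟨n, s⟩
      by_cases hlt : n < r.2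
      · have h1 : bestStep (conv (some (n, s))) r = conv (some (r.2, r.1)) := by
          simp only [conv, bestStep]
          rw [if_pos (by exact_mod_cast hlt)]
        have h2 : maxStep (some (n, s)) (r.2, r.1) = some (r.2, r.1) := by
          simp [maxStep, hlt]
        rw [h1, ih _ htail, h2]
      · have h1 : bestStep (conv (some (n, s))) r = conv (some (n, s)) := by
          simp only [conv, bestStep]
          rw [if_neg (by exact_mod_cast hlt)]
        have h2 : maxStep (some (n, s)) (r.2, r.1) = some (n, s) := by
          simp [maxStep, hlt]
        rw [h1, ih _ htail, h2]

lemma maxStep_key (rs : List (Nat × Nat)) : ∀ acc,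
    ((List.foldl maxStep acc rs).map (·.1)).getD 0
      = List.foldl max ((acc.map (·.1)).getD 0) (rs.map (·.1)) := by
  induction rs with
  | nil => intro acc; rfl
  | cons r rs ih =>
    intro acc
    rw [List.foldl_cons, List.map_cons, List.foldl_cons, ih]
    congr 1
    cases acc with
    | none => simp [maxStep]
    | some m =>
      by_cases h : m.1 < r.1
      · simp [maxStep, h, Nat.max_eq_right (le_of_lt h)]
      · simp [maxStep, h, Nat.max_eq_left (Nat.le_of_not_lt h)]

lemma maxStep_isSome (rs : List (Nat × Nat)) : ∀ (p : Nat × Nat),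
    (List.foldl maxStep (some p) rs).isSome := by
  induction rs with
  | nil => intro p; rfl
  | cons r rs ih =>
    intro p
    rw [List.foldl_cons]
    by_cases h : p.1 < r.1
    · simpa [maxStep, h] using ih r
    · simpa [maxStep, h] using ih p

lemma max?_eq_foldl (rs : List (Nat × Nat)) :
    PySem.List.max? rs (fun r => r.1) = List.foldl maxStep none rs := by
  unfold PySem.List.max?
  congr 1
  funext acc x
  cases acc <;> rfl

-- B's inner scan is takeWhile
lemma innerB_eq (luki : List Int) (v : Int) : ∀ (fuel j : Nat), luki.length ≤ fuel + j →
    zad42AltInner luki fuel v j = j + ((luki.drop j).takeWhile (fun g => decide (g = v))).length := by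
  intro fuel
  induction fuel with
  | zero =>
    intro j hf
    rw [List.drop_eq_nil_of_le (by omega)]
    simp [zad42AltInner]
  | succ fuel ih =>
    intro j hf
    rw [zad42AltInner]
    by_cases h : j < luki.length ∧ luki.getD j 0 = v
    · obtain ⟨hj, hv⟩ := h
      rw [if_pos ⟨hj, hv⟩, ih (j+1) (by omega), List.drop_eq_getElem_cons hj]
      have hgv : luki[j] = v := by rwa [List.getD_eq_getElem luki 0 hj] at hv
      rw [hgv]
      simp only [List.takeWhile_cons, decide_true, if_true, List.length_cons]
      omega
    · rw [if_neg h]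
      by_cases hj : j < luki.length
      · have hv : ¬ luki.getD j 0 = v := fun hv => h ⟨hj, hv⟩
        rw [List.drop_eq_getElem_cons hj]
        have hgv : ¬ luki[j] = v := by rwa [List.getD_eq_getElem luki 0 hj] at hv
        simp [hgv]
      · rw [List.drop_eq_nil_of_le (by omega)]; simp

lemma innerB_gt (luki : List Int) (i : Nat) (h : i < luki.length) :
    i < zad42AltInner luki luki.length (luki.getD i 0) i := by
  rw [innerB_eq luki (luki.getD i 0) luki.length i (by omega), List.drop_eq_getElem_cons h,
    List.getD_eq_getElem luki 0 h]
  simp only [List.takeWhile_cons, decide_true, if_true, List.length_cons]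
  omega

lemma dropWhile_eq_drop (p : Int → Bool) : ∀ (l : List Int),
    l.dropWhile p = l.drop (l.takeWhile p).length := by
  intro l
  induction l with
  | nil => rfl
  | cons a t ih =>
    by_cases h : p a
    · simp [h, ih]
    · simp [h]

-- runsAux through takeWhile / dropWhile
lemma runsAux_dw_nil (xs : List Int) : ∀ (v : Int) (s len : Nat),
    xs.dropWhile (fun g => decide (g = v)) = [] →
    runsAux v s len xs = [(s, len + (xs.takeWhile (fun g => decide (g = v))).length)] := by
  induction xs with
  | nil => intro v s len _; simp [runsAux]
  | cons x xs ih =>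
    intro v s len h
    by_cases hx : x = v
    · subst hx
      rw [runsAux_cons_self]
      simp only [List.dropWhile_cons, decide_true, if_true] at h
      rw [ih x s (len+1) h]
      simp only [List.takeWhile_cons, decide_true, if_true, List.length_cons]
      generalize (List.takeWhile (fun g => decide (g = x)) xs).length = t
      rw [show len + 1 + t = len + (t + 1) from by omega]
    · simp [hx] at h

lemma runsAux_dw_cons (xs : List Int) : ∀ (v : Int) (s len : Nat) (y : Int) (ys : List Int),
    xs.dropWhile (fun g => decide (g = v)) = y :: ys →
    runsAux v s len xs
      = (s, len + (xs.takeWhile (fun g => decide (g = v))).length) ::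
        runsAux y (s + len + (xs.takeWhile (fun g => decide (g = v))).length) 1 ys := by
  induction xs with
  | nil => intro v s len y ys h; simp at h
  | cons x xs ih =>
    intro v s len y ys h
    by_cases hx : x = v
    · subst hx
      rw [runsAux_cons_self]
      simp only [List.dropWhile_cons, decide_true, if_true] at h
      rw [ih x s (len+1) y ys h]
      simp only [List.takeWhile_cons, decide_true, if_true, List.length_cons]
      generalize (List.takeWhile (fun g => decide (g = x)) xs).length = t
      rw [show len + 1 + t = len + (t + 1) from by omega,
        show s + (len + 1) + t = s + len + (t + 1) from by omega]
    · simp only [List.dropWhile_cons, decide_eq_true_eq, if_neg hx] at h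
      obtain ⟨rfl, rfl⟩ : x = y ∧ xs = ys := by
        exact ⟨(List.cons.injEq _ _ _ _ ▸ h).1, (List.cons.injEq _ _ _ _ ▸ h).2⟩
      rw [runsAux_cons_ne hx]
      simp [hx]

-- the runs produced from position i onward (specification of B's outer loop)
def outerSpec (luki : List Int) (i : Nat) : List (Nat × Nat) :=
  if _h : i < luki.length then
    (runsAux (luki.getD i 0) i 1 (luki.drop (i+1))).map (fun r => (r.2, r.1))
  else []

lemma outerSpec_step (luki : List Int) (i : Nat) (h : i < luki.length) :
    outerSpec luki i
      = (zad42AltInner luki luki.length (luki.getD i 0) i - i, i) ::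
          outerSpec luki (zad42AltInner luki luki.length (luki.getD i 0) i) := by
  have hdropi : luki.drop i = luki.getD i 0 :: luki.drop (i+1) := by
    rw [List.drop_eq_getElem_cons h, List.getD_eq_getElem luki 0 h]
  have hj : zad42AltInner luki luki.length (luki.getD i 0) i
      = i + 1 + ((luki.drop (i+1)).takeWhile (fun g => decide (g = luki.getD i 0))).length := by
    rw [innerB_eq luki (luki.getD i 0) luki.length i (by omega), hdropi]
    simp only [List.takeWhile_cons, decide_true, if_true, List.length_cons]
    omega
  set v := luki.getD i 0 with hv
  set t := ((luki.drop (i+1)).takeWhile (fun g => decide (g = v))).length with ht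
  have hdropj : luki.drop (zad42AltInner luki luki.length v i)
      = (luki.drop (i+1)).dropWhile (fun g => decide (g = v)) := by
    rw [hj, dropWhile_eq_drop, ← ht, List.drop_drop]
  rcases hdw : (luki.drop (i+1)).dropWhile (fun g => decide (g = v)) with _ | ⟨y, ys⟩
  · -- the scanned run reaches the end of luki
    have hout : outerSpec luki i = [(t + 1, i)] := by
      rw [outerSpec, dif_pos h, runsAux_dw_nil _ _ _ _ hdw, ← ht]
      simp [Nat.add_comm]
    have hjlen : ¬ zad42AltInner luki luki.length v i < luki.length := by
      have : luki.drop (zad42AltInner luki luki.length v i) = [] := by rw [hdropj, hdw]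
      rw [List.drop_eq_nil_iff] at this
      omega
    rw [hout, outerSpec, dif_neg hjlen]
    have : zad42AltInner luki luki.length v i - i = t + 1 := by omega
    rw [this]
  · -- a next run starts at j
    have hjlen : zad42AltInner luki luki.length v i < luki.length := by
      have hne : luki.drop (zad42AltInner luki luki.length v i) ≠ [] := by
        rw [hdropj, hdw]; simp
      by_contra hc
      exact hne (List.drop_eq_nil_of_le (by omega))
    have hdropj' : luki.drop (zad42AltInner luki luki.length v i) = y :: ys := by rw [hdropj, hdw]
    have hcons : luki[zad42AltInner luki luki.length v i] :: luki.drop (zad42AltInner luki luki.length v i + 1) = y :: ys := by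
      rw [← List.drop_eq_getElem_cons hjlen, hdropj']
    have hgetj : luki.getD (zad42AltInner luki luki.length v i) 0 = y := by
      rw [List.getD_eq_getElem luki 0 hjlen]
      exact (List.cons.inj hcons).1
    have hdropj1 : luki.drop (zad42AltInner luki luki.length v i + 1) = ys := (List.cons.inj hcons).2
    rw [outerSpec, dif_pos h, runsAux_dw_cons _ _ _ _ _ _ hdw, ← ht,
      outerSpec, dif_pos hjlen, hgetj, hdropj1]
    simp only [List.map_cons]
    have h1 : zad42AltInner luki luki.length v i - i = 1 + t := by omega
    have h2 : i + 1 + t = zad42AltInner luki luki.length v i := by omega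
    rw [h1, h2]

lemma outerB_eq (luki : List Int) : ∀ (fuel i : Nat) (runs : List (Nat × Nat)),
    luki.length ≤ fuel + i →
    zad42AltOuter luki fuel i runs = runs ++ outerSpec luki i := by
  intro fuel
  induction fuel with
  | zero =>
    intro i runs hf
    rw [zad42AltOuter, outerSpec, dif_neg (by omega), List.append_nil]
  | succ fuel ih =>
    intro i runs hf
    rw [zad42AltOuter]
    by_cases h : i < luki.length
    · rw [if_pos h, ih _ _ (by have := innerB_gt luki i h; omega),
        outerSpec_step luki i h, List.append_assoc]
      rfl
    · rw [if_neg h, outerSpec, dif_neg h, List.append_nil]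

-- assembly: given gaps = g :: gs with at least two runs, both ports expressed through maxStep folds
lemma assembly (l : List Int) (g : Int) (gs : List Int)
    (hg : List.zipWith (fun x y => |x - y|) l l.tail = g :: gs)
    (hlen : 2 ≤ (runsAux g 0 1 gs).length) :
    ∃ m t nl sl,
      List.foldl maxStep none (((runsAux g 0 1 gs).dropLast).map (fun r => (r.2, r.1))) = some (m, t) ∧
      (runsAux g 0 1 gs).getLast? = some (sl, nl) ∧
      m = (runLensAux g 1 gs).dropLast.foldl max 0 ∧
      nl = ((runLensAux g 1 gs).getLast?).getD 0 ∧
      zad42 l = ((m : Int) + 1, (PySem.List.pyGet? l (t : Int)).getD 0,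
                 (PySem.List.pyGet? l ((t + m : Nat) : Int)).getD 0) ∧
      zad42_alt l = (match maxStep (some (m, t)) (nl, sl) with
        | none => (0, 0, 0)
        | some (n, s) => ((n : Int) + 1, (PySem.List.pyGet? l ((s : Nat) : Int)).getD 0,
                          (PySem.List.pyGet? l (((s + n : Nat)) : Int)).getD 0)) := by
  have hRne : runsAux g 0 1 gs ≠ [] := runsAux_ne_nil gs g 0 1
  have hRdne : (runsAux g 0 1 gs).dropLast ≠ [] := by
    intro hnil
    have := congrArg List.length hnil
    simp [List.length_dropLast] at this
    omega
  obtain ⟨q, hq⟩ : ∃ q, List.foldl maxStep none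
      (((runsAux g 0 1 gs).dropLast).map (fun r => (r.2, r.1))) = some q := by
    rcases hmap : ((runsAux g 0 1 gs).dropLast).map (fun r => (r.2, r.1)) with _ | ⟨a, as⟩
    · exact absurd (List.map_eq_nil_iff.mp hmap) hRdne
    · rw [hmap, List.foldl_cons]
      have := maxStep_isSome as a
      exact Option.isSome_iff_exists.mp (by simpa [maxStep] using this)
  obtain ⟨m, t⟩ := q
  obtain ⟨last, hlast⟩ : ∃ p, (runsAux g 0 1 gs).getLast? = some p := by
    rcases hlp : (runsAux g 0 1 gs).getLast? with _ | p
    · exact absurd (List.getLast?_eq_none_iff.mp hlp) hRne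
    · exact ⟨p, rfl⟩
  obtain ⟨sl, nl⟩ := last
  have hm : m = (runLensAux g 1 gs).dropLast.foldl max 0 := by
    have hk := maxStep_key (((runsAux g 0 1 gs).dropLast).map (fun r => (r.2, r.1))) none
    rw [hq] at hk
    simp only [Option.map_some, Option.getD_some, Option.map_none, Option.getD_none,
      List.map_map] at hk
    rw [show ((fun (x : Nat × Nat) => x.1) ∘ (fun (r : Nat × Nat) => (r.2, r.1)))
        = (fun (r : Nat × Nat) => r.2) from rfl] at hk
    rw [List.map_dropLast, runsAux_snd] at hk
    exact hk
  have hnl : nl = ((runLensAux g 1 gs).getLast?).getD 0 := by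
    rw [← runsAux_snd gs g 0 1, List.getLast?_map, hlast]
    rfl
  refine ⟨m, t, nl, sl, hq, hlast, hm, hnl, ?_, ?_⟩
  · -- A side
    have hg0 : (0:Int) ≤ g := gaps_nonneg l l.tail g (by rw [hg]; exact List.mem_cons_self)
    unfold zad42
    simp only [PySem.List.slice_to_neg_one, PySem.List.slice_from_one, zipWith_dropLast_tail, hg]
    have hstep : zad42Loop (g :: gs) 0 (-1) none 0 none 0
        = zad42Loop gs (0+1) g (some 0) 0 none 0 := by
      simp [zad42Loop, show g ≠ -1 from by omega]
    rw [hstep]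
    have hloop := loopA_eq gs g 0 1 0 none 0
    have hpos : ∀ r ∈ (runsAux g 0 1 gs).dropLast, 1 ≤ r.2 :=
      fun r hr => runsAux_pos gs g 0 1 le_rfl r (List.Sublist.subset (List.dropLast_sublist _) hr)
    rw [show abstrState (0, none, 0) = conv none from rfl] at hloop
    rw [conv_fold _ none hpos, hq] at hloop
    rcases hrr : zad42Loop gs (0+1) g (some 0) 0 none 0 with ⟨bc, bs, be⟩
    rw [hrr] at hloop
    simp only [abstrState, conv, Prod.mk.injEq] at hloop
    obtain ⟨hbc, hbs, hbe⟩ := hloop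
    subst hbc
    subst hbs
    simp only [Option.map_some, Option.some.injEq] at hbe
    subst hbe
    rfl
  · -- B side
    unfold zad42_alt
    simp only [PySem.List.slice_from_one, hg]
    rw [outerB_eq _ _ _ _ (by omega)]
    rw [outerSpec, dif_pos (by simp : 0 < (g :: gs).length)]
    simp only [List.getD_cons_zero, List.drop_succ_cons, List.drop_zero, List.nil_append]
    rw [max?_eq_foldl]
    have hsplit : runsAux g 0 1 gs = (runsAux g 0 1 gs).dropLast ++ [(sl, nl)] := by
      have h1 := List.dropLast_append_getLast hRne
      have h2 : (runsAux g 0 1 gs).getLast hRne = (sl, nl) := by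
        rw [List.getLast?_eq_some_getLast hRne] at hlast
        exact Option.some.inj hlast
      rw [h2] at h1
      exact h1.symm
    have hmapsplit : (runsAux g 0 1 gs).map (fun r => (r.2, r.1))
        = ((runsAux g 0 1 gs).dropLast).map (fun r => (r.2, r.1)) ++ [(nl, sl)] := by
      conv_lhs => rw [hsplit]
      simp
    rw [hmapsplit, List.foldl_append, hq]
    rfl

-- Pre_ gives at least two runs
lemma pre_two_runs (l : List Int) (g : Int) (gs : List Int)
    (hg : List.zipWith (fun x y => |x - y|) l l.tail = g :: gs)
    (hpre : Pre_zad42 l) : 2 ≤ (runLensAux g 1 gs).length := by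
  obtain ⟨p, hp, hne⟩ := hpre
  rw [hg] at hp
  have hone : (runLensAux g 1 gs).length ≠ 1 := by
    intro h1
    exact hne ((runLensAux_len_one_iff gs g 1).mp h1 p (by simpa using hp))
  have := List.length_pos_of_ne_nil (runLensAux_ne_nil gs g 1)
  omega

lemma lens_length (g : Int) (gs : List Int) :
    (runLensAux g 1 gs).length = (runsAux g 0 1 gs).length := by
  rw [← runsAux_snd gs g 0 1, List.length_map]

-- ===== VERDICT =====
theorem zad42_spec : Claim_unchanged_zad42 := by
  intro l _ hpre
  unfold Spec_zad42
  intro hnd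
  rcases hg : List.zipWith (fun x y => |x - y|) l l.tail with _ | ⟨g, gs⟩
  · exfalso
    obtain ⟨p, hp, _⟩ := hpre
    rw [hg] at hp
    simp at hp
  · have hlen2 := pre_two_runs l g gs hg hpre
    obtain ⟨m, t, nl, sl, hq, hlast, hm, hnl, hA, hB⟩ :=
      assembly l g gs hg (by rw [← lens_length]; exact hlen2)
    unfold D_zad42 at hnd
    rw [hg] at hnd
    have hle : nl ≤ m := by
      rw [hm, hnl]
      by_contra hc
      exact hnd ⟨hlen2, by omega⟩
    have hms : maxStep (some (m, t)) (nl, sl) = some (m, t) := by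
      simp [maxStep, show ¬ m < nl from by omega]
    rw [hms] at hB
    rw [hA, hB]

theorem zad42_changed : Claim_changed_zad42 := by
  unfold Claim_changed_zad42
  decide

theorem zad42_tight : Claim_exact_zad42 := by
  intro l _ hpre hd heq
  rcases hg : List.zipWith (fun x y => |x - y|) l l.tail with _ | ⟨g, gs⟩
  · unfold D_zad42 at hd
    rw [hg] at hd
    exact hd
  · have hlen2 := pre_two_runs l g gs hg hpre
    obtain ⟨m, t, nl, sl, hq, hlast, hm, hnl, hA, hB⟩ :=
      assembly l g gs hg (by rw [← lens_length]; exact hlen2)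
    unfold D_zad42 at hd
    rw [hg] at hd
    have hlt : m < nl := by rw [hm, hnl]; exact hd.2
    have hms : maxStep (some (m, t)) (nl, sl) = some (nl, sl) := by
      simp [maxStep, hlt]
    rw [hms] at hB
    rw [hA, hB] at heq
    have h1 : (m : Int) + 1 = (nl : Int) + 1 := congrArg Prod.fst heq
    omega
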